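-- pv_equiv track=rewrite | github.com/ajith633/pythonproblems | hackerrank/pig_latin.py | pig_latinize
-- ===== SOURCE A (Python) =====
-- def pig_latinize(sentence):
--     sentence = sentence.split()
--     for i in range(len(sentence)):
--         word = sentence[i]
--         if word[-1].isalpha():
--             if word[0] in ['a', 'e', 'i', 'o', 'u']:
--                 sentence[i] = word + '-way'
--             else:
--                 sentence[i] = word[1::] + '-' + word[0] + 'ay'
--         else:
--             if word[0] in ['a', 'e', 'i', 'o', 'u']:
--                 sentence[i] = word[:-1:] + '-way' + word[-1]
--             else:
--                 sentence[i] = word[1:-1:] + '-' + word[0] + 'ay' + word[-1]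
--
--     return ' '.join(sentence)
-- ===== SOURCE B (Python) =====
-- def pig_latinize(sentence):
--     # Streaming rewrite: one pass over the characters, no split()/join() and no
--     # word list -- words are accumulated in `cur` and flushed (transformed) into
--     # the growing output string, with the separator emitted on each flush.
--     def transform(word):
--         if word[0] in 'aeiou':
--             head, tag = '', 'way'
--         else:
--             head, tag = word[0], 'ay'
--         core = word[len(head):]
--         if word[-1].isalpha():
--             p = ''
--         else:
--             core, p = core[:-1], word[-1]
--         return core + '-' + head + tag + p
--
--     out = ''
--     cur = ''
--     for c in sentence:
--         if c.isspace():
--             if cur: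
--                 out = (out + ' ' if out else out) + transform(cur)
--                 cur = ''
--         else:
--             cur += c
--     if cur:
--         out = (out + ' ' if out else out) + transform(cur)
--     return out
-- ===== Notes on version B (the rewrite author's own statement) =====
-- stated objective: alternative
-- what changed: Replaces A's split / per-index list mutation / join pipeline by a single streaming pass over the characters with explicit cur/out accumulators that flushes each finished word through a unified head+tag transform, emitting separators on flush; no word list is ever built, at the price of rebuilding the output string on each flush.
import Mathlib
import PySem

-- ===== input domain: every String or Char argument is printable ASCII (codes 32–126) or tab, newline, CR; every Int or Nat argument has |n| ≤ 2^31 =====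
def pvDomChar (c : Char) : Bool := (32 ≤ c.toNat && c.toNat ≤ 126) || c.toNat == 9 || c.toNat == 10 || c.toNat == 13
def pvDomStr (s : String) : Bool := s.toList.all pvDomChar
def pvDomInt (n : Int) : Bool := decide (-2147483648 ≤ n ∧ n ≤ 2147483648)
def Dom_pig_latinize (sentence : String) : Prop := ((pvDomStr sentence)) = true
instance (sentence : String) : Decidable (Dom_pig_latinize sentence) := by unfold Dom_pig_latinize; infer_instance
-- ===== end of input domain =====

-- B replaces A's split / per-index mutation / join pipeline by one streaming pass over the
-- characters with cur/out accumulators, flushing finished words through a head+tag transform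
-- (objective: alternative — different traversal structure; the output string is rebuilt at each flush).

-- ===== PORT A =====
-- A's loop body for one word; word[-1] / word[0] via pyGet? (none = IndexError,
-- unreachable: split() yields no empty word, so the fallback branch never fires)
def pigA_step (word : List Char) : List Char :=
  match PySem.List.pyGet? word (-1), PySem.List.pyGet? word 0 with
  | some last, some first =>
    if PySem.Chars.isalpha last then
      if ['a','e','i','o','u'].contains first then
        word ++ ['-','w','a','y']
      else
        PySem.List.slice word (some 1) none ++ ['-'] ++ [first] ++ ['a','y']
    else
      if ['a','e','i','o','u'].contains first then
        PySem.List.slice word none (some (-1)) ++ ['-','w','a','y'] ++ [last]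
      else
        PySem.List.slice word (some 1) (some (-1)) ++ ['-'] ++ [first] ++ ['a','y'] ++ [last]
  | _, _ => word

def pig_latinize (sentence : String) : String :=
  let ws := PySem.Chars.split₀ sentence.toList
  let ws' := (PySem.List.pyRange 0 (ws.length : Int) 1).foldl
      (fun acc i => acc.set i.toNat (pigA_step (PySem.List.pyGetD acc i []))) ws
  String.ofList (PySem.Chars.join [' '] ws')

-- ===== PORT B =====
-- B's transform(word); 'word[0] in "aeiou"' ported as membership — exact, word[0] is one char
def pigB_word (word : List Char) : List Char :=
  match PySem.List.pyGet? word 0, PySem.List.pyGet? word (-1) with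
  | some first, some last =>
    let ht : List Char × List Char :=
      if ['a','e','i','o','u'].contains first then ([], ['w','a','y']) else ([first], ['a','y'])
    let core₀ := PySem.List.slice word (some (ht.1.length : Int)) none
    let cp : List Char × List Char :=
      if PySem.Chars.isalpha last then (core₀, [])
      else (PySem.List.slice core₀ none (some (-1)), [last])
    cp.1 ++ ['-'] ++ ht.1 ++ ht.2 ++ cp.2
  | _, _ => word

-- B's flush: '(out + " " if out else out) + transform(cur)'
def pigB_flush (out cur : List Char) : List Char :=
  (if out.isEmpty then out else out ++ [' ']) ++ pigB_word cur

-- B's for-loop over the characters with state (cur, out), then the final flush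
def pigB_go : List Char → List Char → List Char → List Char
  | [], cur, out => if cur.isEmpty then out else pigB_flush out cur
  | c :: rest, cur, out =>
      if PySem.Chars.isspace c then
        if cur.isEmpty then pigB_go rest cur out
        else pigB_go rest [] (pigB_flush out cur)
      else pigB_go rest (cur ++ [c]) out

def pig_latinize_alt (sentence : String) : String :=
  String.ofList (pigB_go sentence.toList [] [])

-- ===== PRECONDITION & SPEC =====
def Spec_pig_latinize (sentence : String) (out : String) : Prop := out = pig_latinize_alt sentence
instance (sentence : String) (out : String) : Decidable (Spec_pig_latinize sentence out) := by unfold Spec_pig_latinize; infer_instance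

-- ===== CLAIM (what is proved, stated in full; the proofs are below) =====
def Claim_equal_pig_latinize : Prop := ∀ (sentence : String), Dom_pig_latinize sentence → Spec_pig_latinize sentence (pig_latinize sentence)

-- ===== LEMMAS AND PROOFS =====

-- A's for-i loop rewrites position i from its own old value only, so it is a map
lemma foldl_set_pyRange {α : Type} (f : α → α) (d : α) :
    ∀ (ws pre : List α),
      (PySem.List.pyRange (pre.length : Int) ((pre.length + ws.length : Nat) : Int) 1).foldl
        (fun acc i => acc.set i.toNat (f (PySem.List.pyGetD acc i d))) (pre ++ ws)
      = pre ++ ws.map f := by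
  intro ws
  induction ws with
  | nil =>
    intro pre
    simp [PySem.List.pyRange]
  | cons w ws ih =>
    intro pre
    rw [PySem.List.pyRange_one_cons
      (by have h0 : 0 < (w :: ws).length := by simp
          push_cast
          omega)]
    simp only [List.foldl_cons]
    have hget : PySem.List.pyGetD (pre ++ w :: ws) (pre.length : Int) d = w := by
      rw [PySem.List.pyGetD_of_nonneg _ _ (by positivity)]
      simp [List.getD]
    have hset : (pre ++ w :: ws).set ((pre.length : Int)).toNat (f w) = (pre ++ [f w]) ++ ws := by
      simp
    have hlen : ((pre ++ [f w]).length : Int) = (pre.length : Int) + 1 := by simp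
    have hlen2 : ((pre.length + (w :: ws).length : Nat) : Int) = (((pre ++ [f w]).length + ws.length : Nat) : Int) := by
      push_cast; simp; ring
    have := ih (pre ++ [f w])
    rw [hlen, ← hlen2] at this
    rw [hget, hset, this]
    simp

-- word[1:-1] on a nonempty word is tail-of-dropLast
lemma slice_mid (w : List Char) (h : w ≠ []) :
    PySem.List.slice w (some 1) (some (-1)) = w.dropLast.tail := by
  have hl : 1 ≤ w.length := List.length_pos_iff.mpr h
  simp [PySem.List.slice, PySem.List.clampIdx, h, Nat.min_eq_left hl]
  rw [List.dropLast_eq_take, ← List.drop_one (l := (List.take (w.length - 1) w)), List.drop_take]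
  congr 1
  · omega
  · exact List.drop_one.symm

-- per word: A's four branches equal B's head+tag transform
lemma step_eq_word (w : List Char) : pigA_step w = pigB_word w := by
  cases w with
  | nil => rfl
  | cons c t =>
    unfold pigA_step pigB_word
    obtain ⟨last, h1⟩ := Option.isSome_iff_exists.mp
      (show (PySem.List.pyGet? (c :: t) (-1)).isSome by
        simp [PySem.List.pyGet?, PySem.List.pyIdx?])
    have h2 : PySem.List.pyGet? (c :: t) 0 = some c := by
      simp [PySem.List.pyGet?, PySem.List.pyIdx?]
    rw [h1, h2]
    by_cases ha : PySem.Chars.isalpha last = true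
    · by_cases hv : (['a','e','i','o','u'].contains c) = true
      · simp at hv
        simp [ha, hv, PySem.List.slice]
      · simp at hv
        simp [ha, hv, PySem.List.slice_from_one]
    · by_cases hv : (['a','e','i','o','u'].contains c) = true
      · simp at hv
        simp [ha, hv, PySem.List.slice]
      · simp at hv
        simp [ha, hv, PySem.List.slice_to_neg_one, PySem.List.slice_from_one,
              slice_mid (c :: t) (by simp), List.tail_dropLast]

-- ---- streaming scan = split-then-map-then-join ----

-- B's output on a nonempty word is nonempty (it always contains the '-')
lemma pigB_word_ne_nil (c : Char) (t : List Char) : pigB_word (c :: t) ≠ [] := by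
  unfold pigB_word
  obtain ⟨last, h1⟩ := Option.isSome_iff_exists.mp
    (show (PySem.List.pyGet? (c :: t) (-1)).isSome by
      simp [PySem.List.pyGet?, PySem.List.pyIdx?])
  have h2 : PySem.List.pyGet? (c :: t) 0 = some c := by
    simp [PySem.List.pyGet?, PySem.List.pyIdx?]
  rw [h1, h2]
  simp

-- split₀.go prepends its accumulator (reversed) to the rest of its result
lemma split_go_acc : ∀ (s cur : List Char) (acc : List (List Char)),
    PySem.Chars.split₀.go s cur acc = acc.reverse ++ PySem.Chars.split₀.go s cur [] := by
  intro s
  induction s with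
  | nil =>
    intro cur acc
    simp only [PySem.Chars.split₀.go]
    split_ifs <;> simp
  | cons c rest ih =>
    intro cur acc
    simp only [PySem.Chars.split₀.go]
    split_ifs with hs hc
    · exact ih [] acc
    · rw [ih [] (cur.reverse :: acc), ih [] [cur.reverse]]
      simp
    · exact ih (c :: cur) acc

-- proof-side abbreviation: 'out already emitted, these words still to be joined on'
def pigGlue (out : List Char) (ps : List (List Char)) : List Char :=
  match ps with
  | [] => out
  | _ => (if out.isEmpty then out else out ++ [' ']) ++ PySem.Chars.join [' '] ps

lemma pigGlue_cons (out x : List Char) (ps : List (List Char)) (hx : x ≠ []) :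
    pigGlue out (x :: ps) = pigGlue ((if out.isEmpty then out else out ++ [' ']) ++ x) ps := by
  cases ps with
  | nil => simp [pigGlue, PySem.Chars.join, List.intercalate]
  | cons p ps' =>
    have hcons : List.intercalate [' '] (x :: p :: ps')
        = x ++ [' '] ++ List.intercalate [' '] (p :: ps') := by
      simp [List.intercalate]
    have hne : ((if out.isEmpty then out else out ++ [' ']) ++ x).isEmpty = false := by
      split_ifs <;> simp [hx]
    simp only [pigGlue, PySem.Chars.join, hcons, hne, Bool.false_eq_true, if_false]
    split_ifs with h
    · simp [List.isEmpty_iff.mp h]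
    · simp [List.append_assoc]

lemma pigGlue_nil_out (ps : List (List Char)) :
    pigGlue [] ps = PySem.Chars.join [' '] ps := by
  cases ps <;> simp [pigGlue, PySem.Chars.join, List.intercalate]

-- loop invariant of B's scan: pending word cur, emitted prefix out
lemma go_glue : ∀ (s cur out : List Char),
    pigB_go s cur out
      = pigGlue out ((PySem.Chars.split₀.go s cur.reverse []).map pigB_word) := by
  intro s
  induction s with
  | nil =>
    intro cur out
    cases cur with
    | nil => simp [pigB_go, PySem.Chars.split₀.go, pigGlue]
    | cons a b =>
      simp [pigB_go, PySem.Chars.split₀.go, pigGlue, pigB_flush,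
            PySem.Chars.join, List.intercalate]
  | cons ch rest ih =>
    intro cur out
    by_cases hs : PySem.Chars.isspace ch = true
    · cases cur with
      | nil =>
        simp only [pigB_go, hs, if_pos, List.isEmpty_nil, List.reverse_nil,
                   PySem.Chars.split₀.go]
        simpa using ih [] out
      | cons a b =>
        have hrw : PySem.Chars.split₀.go (ch :: rest) (a :: b).reverse []
            = (a :: b) :: PySem.Chars.split₀.go rest [] [] := by
          simp only [PySem.Chars.split₀.go]
          rw [if_pos hs, if_neg (by simp), split_go_acc rest [] [(a :: b).reverse.reverse]]
          simp
        rw [hrw]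
        simp only [List.map_cons]
        rw [pigGlue_cons out _ _ (pigB_word_ne_nil a b)]
        simp only [pigB_go, hs, if_pos, List.isEmpty_cons]
        have := ih [] ((if out.isEmpty then out else out ++ [' ']) ++ pigB_word (a :: b))
        simpa [pigB_flush] using this
    · have hrw : PySem.Chars.split₀.go (ch :: rest) cur.reverse []
          = PySem.Chars.split₀.go rest (cur ++ [ch]).reverse [] := by
        simp only [PySem.Chars.split₀.go]
        rw [if_neg hs]
        simp
      rw [hrw]
      simp only [pigB_go, hs]
      simpa using ih (cur ++ [ch]) out

-- ===== VERDICT (by name: the statement is the Claim_ definition above) =====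
theorem pig_latinize_spec : Claim_equal_pig_latinize := by
  intro s _
  unfold Spec_pig_latinize pig_latinize pig_latinize_alt
  have h := foldl_set_pyRange (α := List Char) pigA_step [] (PySem.Chars.split₀ s.toList) []
  simp only [List.length_nil, List.nil_append, Nat.zero_add, Nat.cast_zero] at h
  show String.ofList (PySem.Chars.join [' ']
      (List.foldl (fun acc i => acc.set i.toNat (pigA_step (PySem.List.pyGetD acc i [])))
        (PySem.Chars.split₀ s.toList)
        (PySem.List.pyRange 0 ((PySem.Chars.split₀ s.toList).length : Int) 1))) = _
  rw [h, funext step_eq_word, go_glue]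
  simp only [List.reverse_nil, pigGlue_nil_out]
  rfl
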